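-- pv_equiv track=rewrite | github.com/tomoya0318/PM25 | src/pattern/convert_code_into_pattern.py | extract_valid_subsequences
-- ===== SOURCE A (Python) =====
-- from collections import Counter
-- from itertools import combinations
--
-- def extract_valid_subsequences(tokens):
--     """指定された開始トークンで始まり、少なくとも1つの'-'または'+'が含まれる部分列を抽出し、その頻度をカウントする
--
--     Args:
--         tokens (list): トークンのリスト
--
--     Returns:
--         Counter: 有効な部分列とその頻度を含むカウンターオブジェクト
--     """
--     subsequences = []
--     start_token = tokens[0]
--     n = len(tokens)
--     for length in range(2, n + 1):  # 部分列の長さを2からnまで変更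
--         for comb in combinations(range(1, n), length - 1):  # 各長さで部分列を生成（start_tokenを固定）
--             subseq = (start_token,) + tuple(tokens[i] for i in comb)
--             if any(token.startswith(("-", "+")) for token in subseq):
--                 subsequences.append(subseq)
--
--     # 部分列の頻度をカウント
--     subseq_counter = Counter(subsequences)
--
--     return subseq_counter
-- ===== SOURCE B (Python) =====
-- from collections import Counter
--
-- def extract_valid_subsequences(tokens):
--     """Same result as A: recursive choose/skip combination generator over the
--     token tail plus direct dict counting (no intermediate subsequences list)."""
--     start_token = tokens[0]
--     rest = tokens[1:]
--
--     def combos(lst, k):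
--         if k == 0:
--             return [()]
--         if not lst:
--             return []
--         head, tail = lst[0], lst[1:]
--         return [(head,) + c for c in combos(tail, k - 1)] + combos(tail, k)
--
--     counts = {}
--     for k in range(1, len(tokens)):
--         for c in combos(rest, k):
--             subseq = (start_token,) + c
--             if any(t.startswith(("-", "+")) for t in subseq):
--                 counts[subseq] = counts.get(subseq, 0) + 1
--     return Counter(counts)
-- ===== Notes on version B (the rewrite author's own statement) =====
-- stated objective: alternative
-- what changed: Replaced the itertools.combinations-over-index-tuples enumeration plus an intermediate subsequences list fed to Counter with a recursive include/exclude combination generator over the token tail and direct dict counting in one pass.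
import Mathlib
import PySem

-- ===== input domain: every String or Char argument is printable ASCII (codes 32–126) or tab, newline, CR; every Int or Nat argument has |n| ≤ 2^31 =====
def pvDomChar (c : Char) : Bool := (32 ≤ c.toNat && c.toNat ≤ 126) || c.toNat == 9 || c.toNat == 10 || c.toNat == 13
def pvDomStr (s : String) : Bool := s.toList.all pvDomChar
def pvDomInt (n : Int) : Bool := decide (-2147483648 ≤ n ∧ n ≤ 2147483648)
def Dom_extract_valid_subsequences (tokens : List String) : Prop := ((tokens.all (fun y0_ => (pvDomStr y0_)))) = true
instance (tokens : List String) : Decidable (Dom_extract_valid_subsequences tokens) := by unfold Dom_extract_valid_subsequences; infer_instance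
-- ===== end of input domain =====

-- B replaces the length-banded itertools.combinations index enumeration + intermediate
-- list + Counter by a recursive include/exclude combination generator over the token
-- tail and direct dict counting; alternative decomposition, same cost.

-- lex-order combinations of size k (port of itertools.combinations in A; port of the
-- hand-written recursive `combos` helper in B — both produce k-subsequences in lex order)
def pyCombinations {α : Type} (l : List α) (k : Nat) : List (List α) :=
  match k, l with
  | 0, _ => [[]]
  | _ + 1, [] => []
  | k + 1, x :: xs => ((pyCombinations xs k).map (fun c => x :: c)) ++ pyCombinations xs (k + 1)

-- token.startswith(("-", "+"))
def pvStartsPM (t : String) : Bool := PySem.Str.startswith t "-" || PySem.Str.startswith t "+"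

-- ===== PORT A =====
def extract_valid_subsequences (tokens : List String) : List (List String × Int) :=
  let start_token := PySem.List.pyGetD tokens 0 ""     -- tokens[0]; Pre_ excludes []
  let n : Int := tokens.length
  let subsequences : List (List String) :=
    (PySem.List.pyRange 2 (n + 1) 1).foldl (fun acc length =>
      (pyCombinations (PySem.List.pyRange 1 n 1) (length - 1).toNat).foldl (fun acc comb =>
        let subseq := start_token :: comb.map (fun i => PySem.List.pyGetD tokens i "")
        if subseq.any pvStartsPM then acc ++ [subseq] else acc) acc) []
  (PySem.Dict.counter subsequences).items

-- ===== PORT B =====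
def extract_valid_subsequences_alt (tokens : List String) : List (List String × Int) :=
  let start_token := PySem.List.pyGetD tokens 0 ""     -- tokens[0]; Pre_ excludes []
  let rest := PySem.List.slice tokens (some 1) none    -- tokens[1:]
  let counts : PySem.Dict (List String) Int :=
    (PySem.List.pyRange 1 (tokens.length : Int) 1).foldl (fun d k =>
      (pyCombinations rest k.toNat).foldl (fun d c =>
        let subseq := start_token :: c
        if subseq.any pvStartsPM then d.insert subseq (d.getD subseq 0 + 1) else d) d)
      PySem.Dict.empty
  counts.items

-- ===== PRECONDITION & SPEC =====
-- Pre_ excludes only the empty list, where both Pythons raise IndexError on tokens[0].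
def Pre_extract_valid_subsequences (tokens : List String) : Prop := tokens ≠ []
instance (tokens : List String) : Decidable (Pre_extract_valid_subsequences tokens) := by
  unfold Pre_extract_valid_subsequences; infer_instance
def pvWitness_extract_valid_subsequences : List String := ["-a", "b"]

def Spec_extract_valid_subsequences (tokens : List String) (out : List (List String × Int)) : Prop := out = extract_valid_subsequences_alt tokens
instance (tokens : List String) (out : List (List String × Int)) : Decidable (Spec_extract_valid_subsequences tokens out) := by unfold Spec_extract_valid_subsequences; infer_instance

-- ===== CLAIM (what is proved, stated in full; the proofs are below) =====
def Claim_equal_extract_valid_subsequences : Prop := ∀ (tokens : List String), Dom_extract_valid_subsequences tokens → Pre_extract_valid_subsequences tokens → Spec_extract_valid_subsequences tokens (extract_valid_subsequences tokens)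

-- ===== LEMMAS AND PROOFS =====

-- combinations commute with map
theorem pyCombinations_map {α β : Type} (φ : α → β) (l : List α) (k : Nat) :
    pyCombinations (l.map φ) k = (pyCombinations l k).map (List.map φ) := by
  induction l generalizing k with
  | nil => cases k <;> simp [pyCombinations]
  | cons x xs ih =>
    cases k with
    | zero => simp [pyCombinations]
    | succ k => simp [pyCombinations, ih, List.map_map, Function.comp_def]

-- A's full loop nest: conditional list-append folds flatten to filter∘map blocks
theorem foldlA {β : Type} (g : β → List (List Int)) (f : List Int → List String)
    (ks : List β) (acc : List (List String)) :
    ks.foldl (fun acc length => (g length).foldl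
        (fun acc comb => if (f comb).any pvStartsPM then acc ++ [f comb] else acc) acc) acc
      = acc ++ ks.flatMap (fun length => ((g length).map f).filter (fun s => s.any pvStartsPM)) := by
  have inner : ∀ (l : List (List Int)) (acc : List (List String)),
      l.foldl (fun acc comb => if (f comb).any pvStartsPM then acc ++ [f comb] else acc) acc
        = acc ++ (l.map f).filter (fun s => s.any pvStartsPM) := by
    intro l
    induction l with
    | nil => intro acc; simp
    | cons x xs ih =>
      intro acc
      rw [List.foldl_cons, List.map_cons, List.filter_cons]
      by_cases h : (f x).any pvStartsPM
      · rw [if_pos h, if_pos h, ih]; simp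
      · rw [if_neg h, if_neg h, ih]
  induction ks generalizing acc with
  | nil => simp
  | cons k ks ih =>
    rw [List.foldl_cons, List.flatMap_cons, inner, ih, List.append_assoc]

-- B's full loop nest: conditional counting folds are the counting fold over the same flattened list
theorem foldlB {β : Type} (g : β → List (List String)) (f : List String → List String)
    (ks : List β) (d : PySem.Dict (List String) Int) :
    ks.foldl (fun d k => (g k).foldl
        (fun d c => if (f c).any pvStartsPM then d.insert (f c) (d.getD (f c) 0 + 1) else d) d) d
      = (ks.flatMap (fun k => ((g k).map f).filter (fun s => s.any pvStartsPM))).foldl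
          (fun d y => d.insert y (d.getD y 0 + 1)) d := by
  have inner : ∀ (l : List (List String)) (d : PySem.Dict (List String) Int),
      l.foldl (fun d c => if (f c).any pvStartsPM then d.insert (f c) (d.getD (f c) 0 + 1) else d) d
        = ((l.map f).filter (fun s => s.any pvStartsPM)).foldl
            (fun d y => d.insert y (d.getD y 0 + 1)) d := by
    intro l
    induction l with
    | nil => intro d; simp
    | cons x xs ih =>
      intro d
      rw [List.foldl_cons, List.map_cons, List.filter_cons]
      by_cases h : (f x).any pvStartsPM
      · rw [if_pos h, if_pos h, ih, List.foldl_cons]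
      · rw [if_neg h, if_neg h, ih]
  induction ks generalizing d with
  | nil => simp
  | cons k ks ih =>
    rw [List.foldl_cons, List.flatMap_cons, List.foldl_append, inner, ih]

-- the per-size block of A equals the per-size block of B
theorem block_eq (tokens : List String) (k : Nat) :
    ((pyCombinations (PySem.List.pyRange 1 (tokens.length : Int) 1) k).map
        (fun comb => (PySem.List.pyGetD tokens 0 "") ::
          comb.map (fun i => PySem.List.pyGetD tokens i ""))).filter (fun s => s.any pvStartsPM)
      = ((pyCombinations (PySem.List.slice tokens (some 1) none) k).map
          (fun c => (PySem.List.pyGetD tokens 0 "") :: c)).filter (fun s => s.any pvStartsPM) := by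
  have hmap : (PySem.List.pyRange 1 (tokens.length : Int) 1).map
      (fun i => PySem.List.pyGetD tokens i "") = PySem.List.slice tokens (some 1) none := by
    rw [PySem.List.slice_from_one]
    have := PySem.List.map_pyGetD_pyRange (xs := tokens) (a := 1) (d := "") (by norm_num)
    simpa [← List.drop_one] using this
  rw [← hmap, pyCombinations_map, List.map_map]
  rfl

-- A's flattened subsequences list equals B's flattened subsequences list
theorem flat_eq (tokens : List String) :
    (PySem.List.pyRange 2 ((tokens.length : Int) + 1) 1).flatMap (fun length =>
        ((pyCombinations (PySem.List.pyRange 1 (tokens.length : Int) 1) (length - 1).toNat).map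
          (fun comb => (PySem.List.pyGetD tokens 0 "") ::
            comb.map (fun i => PySem.List.pyGetD tokens i ""))).filter (fun s => s.any pvStartsPM))
      = (PySem.List.pyRange 1 (tokens.length : Int) 1).flatMap (fun k =>
          ((pyCombinations (PySem.List.slice tokens (some 1) none) k.toNat).map
            (fun c => (PySem.List.pyGetD tokens 0 "") :: c)).filter (fun s => s.any pvStartsPM)) := by
  have hshift : PySem.List.pyRange 2 ((tokens.length : Int) + 1) 1
      = (PySem.List.pyRange 1 (tokens.length : Int) 1).map (fun x => x + 1) := by
    rw [PySem.List.pyRange_one 2, PySem.List.pyRange_one 1 (tokens.length : Int), List.map_map]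
    have hlen : ((tokens.length : Int) + 1 - 2).toNat = ((tokens.length : Int) - 1).toNat := by omega
    rw [hlen]
    apply List.map_congr_left
    intro j _
    simp only [Function.comp_def]
    omega
  rw [hshift, List.flatMap_map]
  apply List.flatMap_congr
  intro x hx
  have hx1 : (1 : Int) ≤ x := (PySem.List.mem_pyRange_one.mp hx).1
  have h1 : (x + 1 - 1).toNat = x.toNat := by omega
  rw [h1]
  exact block_eq tokens x.toNat

-- the two loop-shape lemmas specialised to the ports' concrete bodies
theorem foldlA' (tokens : List String) :
    (PySem.List.pyRange 2 ((tokens.length : Int) + 1) 1).foldl (fun acc length =>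
        (pyCombinations (PySem.List.pyRange 1 (tokens.length : Int) 1) (length - 1).toNat).foldl
          (fun acc comb =>
            if ((PySem.List.pyGetD tokens 0 "") ::
                comb.map (fun i => PySem.List.pyGetD tokens i "")).any pvStartsPM then
              acc ++ [(PySem.List.pyGetD tokens 0 "") ::
                comb.map (fun i => PySem.List.pyGetD tokens i "")]
            else acc) acc) []
      = [] ++ (PySem.List.pyRange 2 ((tokens.length : Int) + 1) 1).flatMap (fun length =>
          ((pyCombinations (PySem.List.pyRange 1 (tokens.length : Int) 1) (length - 1).toNat).map
            (fun comb => (PySem.List.pyGetD tokens 0 "") ::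
              comb.map (fun i => PySem.List.pyGetD tokens i ""))).filter
              (fun s => s.any pvStartsPM)) :=
  foldlA _ _ _ _

theorem foldlB' (tokens : List String) :
    (PySem.List.pyRange 1 (tokens.length : Int) 1).foldl (fun d k =>
        (pyCombinations (PySem.List.slice tokens (some 1) none) k.toNat).foldl
          (fun d c =>
            if ((PySem.List.pyGetD tokens 0 "") :: c).any pvStartsPM then
              d.insert ((PySem.List.pyGetD tokens 0 "") :: c)
                (d.getD ((PySem.List.pyGetD tokens 0 "") :: c) 0 + 1)
            else d) d) (PySem.Dict.empty : PySem.Dict (List String) Int)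
      = ((PySem.List.pyRange 1 (tokens.length : Int) 1).flatMap (fun k =>
          ((pyCombinations (PySem.List.slice tokens (some 1) none) k.toNat).map
            (fun c => (PySem.List.pyGetD tokens 0 "") :: c)).filter
            (fun s => s.any pvStartsPM))).foldl
          (fun d y => d.insert y (d.getD y 0 + 1)) (PySem.Dict.empty : PySem.Dict (List String) Int) :=
  foldlB _ _ _ _

-- ===== VERDICT (by name: the statement is the Claim_ definition above) =====
theorem extract_valid_subsequences_spec : Claim_equal_extract_valid_subsequences := by
  intro tokens _ _
  show extract_valid_subsequences tokens = extract_valid_subsequences_alt tokens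
  simp only [extract_valid_subsequences, extract_valid_subsequences_alt]
  rw [foldlA' tokens, foldlB' tokens, List.nil_append, flat_eq,
    PySem.Dict.foldl_insert_getD_add_one_eq_counter]
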